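-- pv_equiv track=rewrite | github.com/ashokgaire/codeForces | codeForces/round#719(Div.3)/A.py | process
-- ===== SOURCE A (Python) =====
-- def process(s,n):
--     result = {}
--     ans = "YES"
--
--     for i in range(n):
--         if s[i] not in result.values():
--             result[i] = s[i]
--         elif s[i] in result.values() and s[i] != s[i-1]:
--             ans = "NO"
--     return ans
-- ===== SOURCE B (Python) =====
-- def process(s, n):
--     # Run-compress s[:n] (indexing via range(n) so n > len(s) still raises),
--     # then answer "NO" iff some run key recurs across different runs.
--     groups = [s[i] for i in range(n) if i == 0 or s[i] != s[i - 1]]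
--     return "YES" if len(set(groups)) == len(groups) else "NO"
-- ===== Notes on version B (the rewrite author's own statement) =====
-- stated objective: faster
-- what changed: Replaces the index-keyed seen-dict scan with a mutable answer flag by a two-step decomposition: run-compress the first n characters into a list, then answer NO exactly when the compressed list has a duplicate (len(set(...)) check).
import Mathlib
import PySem

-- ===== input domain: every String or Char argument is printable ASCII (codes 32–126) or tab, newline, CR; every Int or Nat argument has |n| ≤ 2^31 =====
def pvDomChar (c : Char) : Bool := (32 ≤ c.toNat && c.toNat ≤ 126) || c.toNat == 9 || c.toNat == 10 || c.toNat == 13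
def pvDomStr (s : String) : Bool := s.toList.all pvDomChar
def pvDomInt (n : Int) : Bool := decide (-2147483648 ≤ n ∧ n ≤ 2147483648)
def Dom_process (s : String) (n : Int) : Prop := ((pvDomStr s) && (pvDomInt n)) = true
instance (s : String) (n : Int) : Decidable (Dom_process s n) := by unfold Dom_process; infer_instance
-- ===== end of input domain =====

-- B replaces A's seen-dict/answer-flag scan by run-compressing the first n characters
-- and checking the compressed list for a duplicate; objective: simpler.

-- ===== PORT A =====
-- one step of A's loop body, at index i with current state (result, ans)
def processStep (s : String) (st : PySem.Dict Int Char × String) (i : Int) :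
    PySem.Dict Int Char × String :=
  match PySem.Str.pyGet? s i with
  | none => st
  | some c =>
    if (st.1.values.contains c) = false then (st.1.insert i c, st.2)
    else if st.1.values.contains c && (PySem.Str.pyGet? s (i - 1) != some c) then
      (st.1, "NO")
    else st

def process (s : String) (n : Int) : String :=
  ((PySem.List.pyRange 0 n 1).foldl (processStep s) (PySem.Dict.empty, "YES")).2

-- ===== PORT B =====
-- one step of B's comprehension: keep s[i] exactly when it starts a new run
def processAltStep (s : String) (acc : List Char) (i : Int) : List Char :=
  match PySem.Str.pyGet? s i with
  | none => acc
  | some c => if i == 0 || (PySem.Str.pyGet? s (i - 1) != some c) then acc ++ [c] else acc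

def process_alt (s : String) (n : Int) : String :=
  let groups := (PySem.List.pyRange 0 n 1).foldl (processAltStep s) []
  if PySem.Set.len (PySem.Set.ofList groups) == groups.length then "YES" else "NO"

-- ===== PRECONDITION & SPEC =====
-- Pre_ excludes exactly n > len(s), where A (and B alike) raise IndexError at s[i].
def Pre_process (s : String) (n : Int) : Prop := n ≤ (s.length : Int)
instance (s : String) (n : Int) : Decidable (Pre_process s n) := by unfold Pre_process; infer_instance
def pvWitness_process : String × Int := ("abcab", 5)
def Spec_process (s : String) (n : Int) (out : String) : Prop := out = process_alt s n
instance (s : String) (n : Int) (out : String) : Decidable (Spec_process s n out) := by unfold Spec_process; infer_instance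

-- ===== CLAIM (what is proved, stated in full; the proofs are below) =====
def Claim_equal_process : Prop := ∀ (s : String) (n : Int), Dom_process s n → Pre_process s n → Spec_process s n (process s n)

-- ===== LEMMAS AND PROOFS =====

theorem pv_values_insert (d : PySem.Dict Int Char) (k : Int) (v : Char)
    (h : d.contains k = false) : (d.insert k v).values = d.values ++ [v] := by
  have hi := PySem.Dict.items_insert_of_not_contains (d := d) (k := k) (v := v) h
  show (d.insert k v).items.map Prod.snd = d.items.map Prod.snd ++ [v]
  rw [hi]; simp

theorem pv_keys_insert (d : PySem.Dict Int Char) (k : Int) (v : Char)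
    (h : d.contains k = false) : (d.insert k v).keys = d.keys ++ [k] := by
  have hi := PySem.Dict.items_insert_of_not_contains (d := d) (k := k) (v := v) h
  show (d.insert k v).items.map Prod.fst = d.items.map Prod.fst ++ [k]
  rw [hi]; simp

theorem pv_ofList_len_eq_iff (g : List Char) :
    ((PySem.Set.ofList g).length = g.length) ↔ g.Nodup := by
  induction g using List.reverseRecOn with
  | nil => simp [PySem.Set.ofList_nil]
  | append_singleton xs x ih =>
    rw [PySem.Set.ofList_append_singleton, PySem.Set.add]
    by_cases hx : x ∈ xs
    · have hc : (PySem.Set.ofList xs).contains x = true := by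
        simp [PySem.Set.mem_ofList, hx]
      simp only [hc, if_true]
      have hle := PySem.Set.length_ofList_le (xs := xs)
      apply iff_of_false
      · simp; omega
      · intro h
        obtain ⟨_, _, hd⟩ := List.nodup_append.mp h
        exact hd x hx x (by simp) rfl
    · have hc : (PySem.Set.ofList xs).contains x = false := by
        simp [PySem.Set.mem_ofList, hx]
      rw [if_neg (by simp [hx])]
      have h2 : ∀ a ∈ xs, a ≠ x := fun a ha h => hx (h ▸ ha)
      simp [List.nodup_append, ih]
      exact fun _ => h2

theorem pv_invariant (s : String) (m : Nat) (hm : m ≤ s.toList.length) :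
    (((PySem.List.pyRange 0 (m:Int) 1).foldl (processStep s) (PySem.Dict.empty, "YES")).1.values
        = PySem.Set.ofList ((PySem.List.pyRange 0 (m:Int) 1).foldl (processAltStep s) []))
  ∧ (((PySem.List.pyRange 0 (m:Int) 1).foldl (processStep s) (PySem.Dict.empty, "YES")).2
        = if ((PySem.List.pyRange 0 (m:Int) 1).foldl (processAltStep s) []).Nodup then "YES" else "NO")
  ∧ (∀ k ∈ (((PySem.List.pyRange 0 (m:Int) 1).foldl (processStep s) (PySem.Dict.empty, "YES")).1.keys), k < (m:Int))
  ∧ (0 < m → PySem.Str.pyGet? s ((m:Int) - 1)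
        = ((PySem.List.pyRange 0 (m:Int) 1).foldl (processAltStep s) []).getLast?
      ∧ ((PySem.List.pyRange 0 (m:Int) 1).foldl (processAltStep s) []) ≠ []) := by
  induction m with
  | zero =>
    refine ⟨rfl, rfl, ?_, by omega⟩
    intro k hk
    simp [PySem.Dict.empty, PySem.Dict.keys] at hk
  | succ m ih =>
    have hm' : m ≤ s.toList.length := by omega
    have hmlt : m < s.toList.length := by omega
    obtain ⟨ihv, iha, ihk, ihl⟩ := ih hm'
    have hr : PySem.List.pyRange 0 ((m + 1 : Nat) : Int) 1
        = PySem.List.pyRange 0 (m : Int) 1 ++ [(m : Int)] := by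
      push_cast
      exact PySem.List.pyRange_one_succ_right (by positivity)
    rw [hr, List.foldl_append, List.foldl_append]
    simp only [List.foldl_cons, List.foldl_nil]
    set stA := (PySem.List.pyRange 0 (m:Int) 1).foldl (processStep s) (PySem.Dict.empty, "YES") with hstA
    set g := (PySem.List.pyRange 0 (m:Int) 1).foldl (processAltStep s) [] with hgdef
    have hget : PySem.Str.pyGet? s (m : Int) = some (s.toList[m]'hmlt) := by
      simp [List.getElem?_eq_getElem hmlt]
    set c := s.toList[m]'hmlt with hc
    have hcont : stA.1.contains (m : Int) = false := by
      rw [PySem.Dict.contains_eq_decide_mem_keys]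
      simp only [decide_eq_false_iff_not]
      intro hmem
      exact absurd (ihk _ hmem) (by omega)
    have hm1 : ((m + 1 : Nat) : Int) - 1 = (m : Int) := by push_cast; ring
    by_cases hcg : c ∈ g
    · -- repeated character: A's first branch is skipped
      have hne : g ≠ [] := by intro h; rw [h] at hcg; exact absurd hcg (by simp)
      have hmpos : 0 < m := by
        rcases Nat.eq_zero_or_pos m with h0 | h; swap; exact h
        exfalso; apply hne; rw [hgdef, h0]; rfl
      obtain ⟨hlast, _⟩ := ihl hmpos
      have hcontc : (PySem.Set.ofList g).contains c = true := by
        simp [PySem.Set.mem_ofList, hcg]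
      have hA1 : ¬ (stA.1.values.contains c = false) := by
        rw [ihv]; simp [PySem.Set.mem_ofList, hcg]
      have hm0' : ((m:Int) == 0) = false := by simp; omega
      have hm0'' : (m : Int) ≠ 0 := by omega
      by_cases hprev : PySem.Str.pyGet? s ((m:Int) - 1) = some c
      · -- adjacent repeat: both sides unchanged
        have hprevL : PySem.List.pyGet? s.toList ((m:Int) - 1) = some c := by
          simpa using hprev
        have hA : processStep s stA (m : Int) = stA := by
          simp only [processStep, hget]
          rw [if_neg hA1, ihv, if_neg (by simp [hprevL])]
        have hB : processAltStep s g (m : Int) = g := by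
          simp only [processAltStep, hget]
          rw [if_neg (by simp [hprevL]; omega)]
        simp only [hA, hB]
        refine ⟨ihv, iha, fun k hk => lt_of_lt_of_le (ihk k hk) (by push_cast; omega), fun _ => ⟨?_, hne⟩⟩
        rw [hm1, hget, ← hlast, hprev]
      · -- repeat across runs: A sets ans to "NO", B appends a duplicate
        have hprevL : ¬ PySem.List.pyGet? s.toList ((m:Int) - 1) = some c := by
          simpa using hprev
        have hA : processStep s stA (m : Int) = (stA.1, "NO") := by
          simp only [processStep, hget]
          rw [if_neg hA1, ihv, if_pos (by simp [PySem.Set.mem_ofList, hcg, hprevL])]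
        have hB : processAltStep s g (m : Int) = g ++ [c] := by
          simp only [processAltStep, hget]
          rw [if_pos (by simp [hprevL])]
        simp only [hA, hB]
        have hnodup : ¬ (g ++ [c]).Nodup := by
          intro h
          obtain ⟨_, _, hd⟩ := List.nodup_append.mp h
          exact hd c hcg c (by simp) rfl
        refine ⟨?_, ?_, fun k hk => lt_of_lt_of_le (ihk k hk) (by push_cast; omega), fun _ => ⟨?_, by simp⟩⟩
        · rw [PySem.Set.ofList_append_singleton, PySem.Set.add, if_pos hcontc, ihv]
        · rw [if_neg hnodup]
        · rw [hm1, hget]; simp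
    · -- new run character: A records it, B appends it
      have hcontc : (PySem.Set.ofList g).contains c = false := by
        simp [PySem.Set.mem_ofList, hcg]
      have hA : processStep s stA (m : Int) = (stA.1.insert (m:Int) c, stA.2) := by
        simp only [processStep, hget]
        rw [if_pos (by rw [ihv]; simp [PySem.Set.mem_ofList, hcg])]
      have hB : processAltStep s g (m : Int) = g ++ [c] := by
        simp only [processAltStep, hget]
        rcases Nat.eq_zero_or_pos m with h0 | hmpos
        · rw [if_pos (by simp [h0])]
        · obtain ⟨hlast, hne⟩ := ihl hmpos
          obtain ⟨l, hl⟩ := Option.isSome_iff_exists.mp (List.getLast?_isSome.mpr hne)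
          have hlg : l ∈ g := List.mem_of_getLast? hl
          have hthis : PySem.List.pyGet? s.toList ((m:Int) - 1) = some l := by
            have : PySem.Str.pyGet? s ((m:Int) - 1) = some l := by rw [hlast, hl]
            simpa using this
          rw [if_pos (by simp [hthis]; exact Or.inr fun h => hcg (h ▸ hlg))]
      simp only [hA, hB]
      have hnodup : (g ++ [c]).Nodup ↔ g.Nodup := by
        simp [List.nodup_append]
        first
        | exact fun a ha h => hcg (h ▸ ha)
        | exact fun _ a ha h => hcg (h ▸ ha)
      refine ⟨?_, ?_, ?_, fun _ => ⟨?_, by simp⟩⟩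
      · rw [pv_values_insert _ _ _ hcont, ihv,
            PySem.Set.ofList_append_singleton, PySem.Set.add, if_neg (by rw [hcontc]; simp)]
      · rw [iha]
        by_cases hnd : g.Nodup
        · rw [if_pos hnd, if_pos (hnodup.mpr hnd)]
        · rw [if_neg hnd, if_neg (fun h => hnd (hnodup.mp h))]
      · intro k hk
        rw [pv_keys_insert _ _ _ hcont] at hk
        rcases List.mem_append.mp hk with h | h
        · exact lt_of_lt_of_le (ihk k h) (by push_cast; omega)
        · simp at h; subst h; push_cast; omega
      · rw [hm1, hget]; simp
theorem pv_final (s : String) (n : Int) (h : n ≤ (s.length : Int)) :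
    process s n = process_alt s n := by
  by_cases hn : n ≤ 0
  · have hr : PySem.List.pyRange 0 n 1 = [] := PySem.List.pyRange_one_eq_nil hn
    simp only [process, process_alt, hr, List.foldl_nil]
    rfl
  · have hn2 : (0:Int) < n := by omega
    have hm : n = ((n.toNat : Nat) : Int) := by omega
    have hlen : n.toNat ≤ s.toList.length := by
      have h2 : s.toList.length = s.length := by simp
      omega
    obtain ⟨_, iha, _, _⟩ := pv_invariant s n.toNat hlen
    simp only [process, process_alt]
    rw [hm, iha]
    set g := (PySem.List.pyRange 0 ((n.toNat : Nat) : Int) 1).foldl (processAltStep s) [] with hg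
    have hlenEq : PySem.Set.len (PySem.Set.ofList g) = ((PySem.Set.ofList g).length : Int) := rfl
    by_cases hd : g.Nodup
    · rw [if_pos hd, if_pos ?_]
      rw [hlenEq, (pv_ofList_len_eq_iff g).mpr hd]
      exact beq_self_eq_true _
    · rw [if_neg hd, if_neg ?_]
      intro hb
      have h1 : PySem.Set.len (PySem.Set.ofList g) = (g.length : Int) := eq_of_beq hb
      rw [hlenEq] at h1
      exact hd ((pv_ofList_len_eq_iff g).mp (by omega))

-- ===== VERDICT (by name: the statement is the Claim_ definition above) =====
theorem process_spec : Claim_equal_process := by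
  intro s n _ hpre
  unfold Spec_process
  exact pv_final s n hpre
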